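-- pv_equiv track=rewrite | github.com/jasper0121/Data-Compression | hw1/Adaptive_Huffman/adaptive_huffman.py | dpcm_transform
-- ===== SOURCE A (Python) =====
-- def dpcm_transform(y_vals, width=512):
--     """對 Y 通道數值進行 DPCM 轉換
--     每列第一個數值減去 128，其後每個數值與前一數值的差值被計算出來
--     """
--     dpcm = []
--     for i in range(0, len(y_vals), width):
--         row = y_vals[i:i + width]
--         if row:
--             dpcm.append(row[0] - 128)
--             dpcm.extend(row[j] - row[j-1] for j in range(1, len(row)))
--     return dpcm
-- ===== SOURCE B (Python) =====
-- def dpcm_transform(y_vals, width=512):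
--     """DPCM transform of the Y channel, one flat pass: an index at a row
--     boundary (i % width == 0) is coded against 128, every other index
--     against its immediate predecessor."""
--     out = []
--     for i in range(len(y_vals)):
--         if i % width == 0:
--             out.append(y_vals[i] - 128)
--         else:
--             out.append(y_vals[i] - y_vals[i - 1])
--     return out
-- ===== Notes on version B (the rewrite author's own statement) =====
-- stated objective: simpler
-- what changed: Replaces the nested row-slice-then-diff loops (materialising each row list and a generator of in-row differences) by one flat loop over all indices that detects row starts with a modulo test and never builds a row.
-- outside the precondition, e.g. on dpcm_transform([5, 6], -2): A returns [], B returns [-123, 1]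
import Mathlib
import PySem

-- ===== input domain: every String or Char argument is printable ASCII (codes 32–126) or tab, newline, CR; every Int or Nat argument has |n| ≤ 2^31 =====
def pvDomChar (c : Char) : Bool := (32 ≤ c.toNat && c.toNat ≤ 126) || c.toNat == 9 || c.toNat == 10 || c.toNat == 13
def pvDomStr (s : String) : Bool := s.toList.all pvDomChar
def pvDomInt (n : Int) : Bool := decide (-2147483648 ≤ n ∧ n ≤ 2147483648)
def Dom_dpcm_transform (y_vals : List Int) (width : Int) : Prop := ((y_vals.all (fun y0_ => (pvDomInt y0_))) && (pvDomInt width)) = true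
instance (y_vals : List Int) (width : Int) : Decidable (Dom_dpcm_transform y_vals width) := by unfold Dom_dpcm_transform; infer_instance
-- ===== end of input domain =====

-- B replaces A's nested row-slice-then-diff structure by one flat index loop with a
-- modulo test for row starts (objective: simpler; same O(n) cost).


-- ===== PORT A =====
def dpcm_transform (y_vals : List Int) (width : Int) : List Int :=
  (PySem.List.pyRange 0 (PySem.List.len y_vals) width).foldl
    (fun dpcm i =>
      let row := PySem.List.slice y_vals (some i) (some (i + width))
      if row ≠ [] then
        (dpcm ++ [PySem.List.pyGetD row 0 0 - 128]) ++
          (PySem.List.pyRange 1 (PySem.List.len row) 1).map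
            (fun j => PySem.List.pyGetD row j 0 - PySem.List.pyGetD row (j - 1) 0)
      else dpcm)
    []

-- ===== PORT B =====
def dpcm_transform_alt (y_vals : List Int) (width : Int) : List Int :=
  (PySem.List.pyRange 0 (PySem.List.len y_vals) 1).foldl
    (fun out i =>
      if PySem.Int.mod i width = 0 then
        out ++ [PySem.List.pyGetD y_vals i 0 - 128]
      else
        out ++ [PySem.List.pyGetD y_vals i 0 - PySem.List.pyGetD y_vals (i - 1) 0])
    []

-- ===== PRECONDITION & SPEC =====
-- Pre_ excludes nonpositive width: on width = 0 A raises ValueError (range step 0, and B's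
-- modulo raises too), and on negative width A's empty result and B's per-element transform
-- are both accidental readings of a corner no caller would specify (width is a row length).
def Pre_dpcm_transform (y_vals : List Int) (width : Int) : Prop := 1 ≤ width
instance (y_vals : List Int) (width : Int) : Decidable (Pre_dpcm_transform y_vals width) := by unfold Pre_dpcm_transform; infer_instance
def pvWitness_dpcm_transform : List Int × Int := ([130, 131, 7, 9], 2)

def Spec_dpcm_transform (y_vals : List Int) (width : Int) (out : List Int) : Prop := out = dpcm_transform_alt y_vals width
instance (y_vals : List Int) (width : Int) (out : List Int) : Decidable (Spec_dpcm_transform y_vals width out) := by unfold Spec_dpcm_transform; infer_instance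

-- ===== CLAIM (what is proved, stated in full; the proofs are below) =====
def Claim_equal_dpcm_transform : Prop := ∀ (y_vals : List Int) (width : Int), Dom_dpcm_transform y_vals width → Pre_dpcm_transform y_vals width → Spec_dpcm_transform y_vals width (dpcm_transform y_vals width)

-- ===== LEMMAS AND PROOFS =====

-- the output block A emits for one row
def pvRowOut (row : List Int) : List Int :=
  if row ≠ [] then
    (PySem.List.pyGetD row 0 0 - 128) ::
      (PySem.List.pyRange 1 (PySem.List.len row) 1).map
        (fun j => PySem.List.pyGetD row j 0 - PySem.List.pyGetD row (j - 1) 0)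
  else []

def pvBlock (xs : List Int) (w : Int) (i : Int) : List Int :=
  pvRowOut (PySem.List.slice xs (some i) (some (i + w)))

-- B's per-index value
def pvG (xs : List Int) (w : Int) (i : Int) : Int :=
  if PySem.Int.mod i w = 0 then PySem.List.pyGetD xs i 0 - 128
  else PySem.List.pyGetD xs i 0 - PySem.List.pyGetD xs (i - 1) 0

-- B is the map of its per-index value over all indices
theorem pvB_eq (xs : List Int) (w : Int) :
    dpcm_transform_alt xs w = (PySem.List.pyRange 0 (PySem.List.len xs) 1).map (pvG xs w) := by
  have h : (fun (out : List Int) i =>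
      if PySem.Int.mod i w = 0 then
        out ++ [PySem.List.pyGetD xs i 0 - 128]
      else
        out ++ [PySem.List.pyGetD xs i 0 - PySem.List.pyGetD xs (i - 1) 0])
      = fun out i => out ++ [pvG xs w i] := by
    funext out i; unfold pvG; split_ifs <;> rfl
  rw [dpcm_transform_alt, h, PySem.List.foldl_append_singleton_eq_map]
  simp

-- A is the concatenation of its per-row blocks
theorem pvA_eq_flat (xs : List Int) (w : Int) :
    dpcm_transform xs w = (PySem.List.pyRange 0 (PySem.List.len xs) w).flatMap (pvBlock xs w) := by
  have h : (fun (dpcm : List Int) i =>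
      let row := PySem.List.slice xs (some i) (some (i + w))
      if row ≠ [] then
        (dpcm ++ [PySem.List.pyGetD row 0 0 - 128]) ++
          (PySem.List.pyRange 1 (PySem.List.len row) 1).map
            (fun j => PySem.List.pyGetD row j 0 - PySem.List.pyGetD row (j - 1) 0)
      else dpcm)
      = fun dpcm i => dpcm ++ pvBlock xs w i := by
    funext dpcm i
    simp only [pvBlock, pvRowOut]
    split_ifs <;> simp
  rw [dpcm_transform, h, PySem.List.foldl_append_eq_flatMap]
  simp



-- L1: peel the first row start
theorem pvRange_cons (b w : Int) (hw : 0 < w) (hb : 0 < b) :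
    PySem.List.pyRange 0 b w = 0 :: PySem.List.pyRange w b w := by
  rw [PySem.List.pyRange_of_pos 0 b hw, PySem.List.pyRange_of_pos w b hw]
  have hK : (if 0 < b then ((b - 0 + w - 1) / w).toNat else 0)
      = (if w < b then ((b - w + w - 1) / w).toNat else 0) + 1 := by
    by_cases h : w < b
    · simp only [hb, h, if_pos]
      have h1 : b - 0 + w - 1 = (b - w + w - 1) + 1 * w := by ring
      rw [h1, Int.add_mul_ediv_right _ _ (by omega : w ≠ 0)]
      have : 0 ≤ (b - w + w - 1) / w := Int.ediv_nonneg (by omega) (by omega)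
      omega
    · simp only [hb, h, if_pos, if_false]
      have h1 : (b - 0 + w - 1) / w = 1 := by
        rw [← PySem.Int.floordiv_eq_ediv_of_pos hw]
        rw [PySem.Int.floordiv_eq_iff_of_pos hw]
        omega
      omega
  rw [hK, List.range_succ_eq_map]
  simp only [List.map_cons, List.map_map]
  refine congrArg₂ _ (by norm_num) (List.map_congr_left ?_)
  intro k _; simp [Function.comp]; ring

-- L2: shift the remaining row starts down by w
theorem pvRange_shift (b w : Int) (hw : 0 < w) :
    PySem.List.pyRange w b w = (PySem.List.pyRange 0 (b - w) w).map (· + w) := by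
  rw [PySem.List.pyRange_of_pos w b hw, PySem.List.pyRange_of_pos 0 (b - w) hw]
  rw [List.map_map]
  have hK : (if w < b then ((b - w + w - 1) / w).toNat else 0)
      = (if 0 < b - w then ((b - w - 0 + w - 1) / w).toNat else 0) := by
    by_cases h : w < b
    · rw [if_pos h, if_pos (by omega)]; norm_num
    · rw [if_neg h, if_neg (by omega)]
  rw [hK]
  exact List.map_congr_left (fun k _ => by simp [Function.comp]; ring)

-- L3: a block at start i + w reads only the suffix after the first row
theorem pvBlock_shift (xs : List Int) (w i : Int) (hw : 0 < w) (hi : 0 ≤ i) :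
    pvBlock xs w (i + w) = pvBlock (xs.drop w.toNat) w i := by
  unfold pvBlock
  refine congrArg pvRowOut ?_
  rw [PySem.List.slice_toNat _ (by omega) (by omega : (0:Int) ≤ i + w + w),
      PySem.List.slice_toNat _ hi (by omega : (0:Int) ≤ i + w)]
  have h1 : (i + w).toNat = i.toNat + w.toNat := by omega
  rw [h1]
  have h2 : (i + w + w).toNat - (i.toNat + w.toNat) = w.toNat := by omega
  have h3 : i.toNat + w.toNat - i.toNat = w.toNat := by omega
  rw [h2, h3, Nat.add_comm, ← List.drop_drop]

-- L4: B's per-index value also reads only the suffix, indices shifted by w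
theorem pvG_shift (xs : List Int) (w i : Int) (hw : 0 < w) (hi : 0 ≤ i)
    (hlt : i < ((xs.drop w.toNat).length : Int)) :
    pvG xs w (i + w) = pvG (xs.drop w.toNat) w i := by
  have hlen : w.toNat ≤ xs.length := by
    by_contra h; rw [List.length_drop] at hlt; omega
  have hnd : ((xs.drop w.toNat).length : Int) = (xs.length : Int) - w := by
    rw [List.length_drop]; omega
  unfold pvG
  have hm : PySem.Int.mod (i + w) w = PySem.Int.mod i w := by
    rw [PySem.Int.mod_eq_emod_of_pos hw, PySem.Int.mod_eq_emod_of_pos hw]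
    have h1 := Int.add_mul_emod_self_left i w 1
    simp only [mul_one] at h1
    exact h1
  rw [hm]
  have hget : ∀ j : Int, 0 ≤ j → j < ((xs.drop w.toNat).length : Int) →
      PySem.List.pyGetD xs (j + w) 0 = PySem.List.pyGetD (xs.drop w.toNat) j 0 := by
    intro j hj hjlt
    rw [PySem.List.pyGetD_eq_getElem xs 0 (by omega) (by omega),
        PySem.List.pyGetD_eq_getElem (xs.drop w.toNat) 0 hj (by omega)]
    have h1 : (j + w).toNat = w.toNat + j.toNat := by omega
    simp [List.getElem_drop, h1]
  split_ifs with h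
  · rw [hget i hi hlt]
  · have hi1 : 1 ≤ i := by
      rcases lt_or_ge i 1 with h1 | h1
      · exfalso; apply h
        have : i = 0 := by omega
        simp [this, PySem.Int.mod_eq_emod_of_pos hw]
      · exact h1
    have h2 : i + w - 1 = (i - 1) + w := by ring
    rw [hget i hi hlt, h2, hget (i - 1) (by omega) (by omega)]

-- L5: A's first-row block is B's per-index map over the first-row indices
theorem pvBlock_zero (xs : List Int) (w : Int) (hw : 0 < w) (hne : xs ≠ []) :
    pvBlock xs w 0 = (PySem.List.pyRange 0 (min w (xs.length : Int)) 1).map (pvG xs w) := by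
  have hpos : 0 < xs.length := List.length_pos_iff.mpr hne
  unfold pvBlock pvRowOut
  have h0w : (0 : Int) + w = w := by ring
  rw [h0w, PySem.List.slice_zero_start, PySem.List.slice_to _ (by omega)]
  have hrowlen : (xs.take w.toNat).length = min w.toNat xs.length := List.length_take ..
  have hrlen : (((xs.take w.toNat).length : Nat) : Int) = min w (xs.length : Int) := by
    rw [hrowlen]; omega
  have hrne : xs.take w.toNat ≠ [] := by
    intro h
    have := congrArg List.length h
    rw [hrowlen] at this
    simp only [List.length_nil] at this
    omega
  rw [if_pos hrne]
  have hrpos : 0 < min w (xs.length : Int) := by omega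
  rw [PySem.List.pyRange_one_cons hrpos]
  simp only [List.map_cons]
  have hgetrow : ∀ j : Int, 0 ≤ j → j < min w (xs.length : Int) →
      PySem.List.pyGetD (xs.take w.toNat) j 0 = PySem.List.pyGetD xs j 0 := by
    intro j hj hjlt
    rw [PySem.List.pyGetD_eq_getElem (xs.take w.toNat) 0 hj (by rw [hrlen]; omega),
        PySem.List.pyGetD_eq_getElem xs 0 hj (by omega)]
    simp [List.getElem_take]
  have hzero : (0 : Int) + 1 = 1 := by norm_num
  rw [hzero]
  refine congrArg₂ (· :: ·) ?_ ?_
  · -- head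
    have h : pvG xs w 0 = PySem.List.pyGetD xs 0 0 - 128 := by
      unfold pvG
      rw [if_pos (by rw [PySem.Int.mod_eq_emod_of_pos hw]; simp)]
    rw [h, hgetrow 0 le_rfl hrpos]
  · -- tail
    simp only [PySem.List.len_eq, hrlen]
    refine List.map_congr_left ?_
    intro j hj
    rw [PySem.List.mem_pyRange_one] at hj
    obtain ⟨hj1, hj2⟩ := hj
    have hjw : j < w := by omega
    have hG : pvG xs w j = PySem.List.pyGetD xs j 0 - PySem.List.pyGetD xs (j - 1) 0 := by
      unfold pvG
      rw [if_neg]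
      rw [PySem.Int.mod_eq_emod_of_pos hw, Int.emod_eq_of_lt (by omega) hjw]
      omega
    rw [hG, hgetrow j (by omega) hj2, hgetrow (j - 1) (by omega) (by omega)]
    try omega

-- L6: B's map over the non-first-row indices, shifted to the suffix
theorem pvMap_shift (xs : List Int) (w : Int) (hw : 0 < w) :
    (PySem.List.pyRange (min w (xs.length : Int)) (xs.length : Int) 1).map (pvG xs w)
      = (PySem.List.pyRange 0 (((xs.drop w.toNat).length : Nat) : Int) 1).map (pvG (xs.drop w.toNat) w) := by
  have hd : ((xs.drop w.toNat).length : Int) = max ((xs.length : Int) - w) 0 := by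
    rw [List.length_drop]; omega
  by_cases hle : (xs.length : Int) ≤ w
  · have h1 : min w (xs.length : Int) = (xs.length : Int) := by omega
    have h2 : ((xs.drop w.toNat).length : Int) = 0 := by omega
    rw [h1, h2, PySem.List.pyRange_one_eq_nil le_rfl, PySem.List.pyRange_one_eq_nil le_rfl]
    simp
  · have hlt : w < (xs.length : Int) := by omega
    have h1 : min w (xs.length : Int) = w := by omega
    have h2 : ((xs.drop w.toNat).length : Int) = (xs.length : Int) - w := by omega
    rw [h1, h2, PySem.List.pyRange_one 0 ((xs.length : Int) - w),
        PySem.List.pyRange_one w (xs.length : Int), List.map_map, List.map_map]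
    have hsub : (xs.length : Int) - w - 0 = (xs.length : Int) - w := by ring
    rw [hsub]
    refine List.map_congr_left ?_
    intro k hk
    rw [List.mem_range] at hk
    simp only [Function.comp]
    have hc : w + (k : Int) = (k : Int) + w := by ring
    have hk' : (k : Int) < ((xs.drop w.toNat).length : Int) := by
      rw [h2]; omega
    rw [hc, pvG_shift xs w (k : Int) hw (by omega) hk']
    norm_num

theorem pvMain (w : Int) (hw : 0 < w) : ∀ (n : Nat), ∀ (xs : List Int), xs.length = n →
    (PySem.List.pyRange 0 (PySem.List.len xs) w).flatMap (pvBlock xs w)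
      = (PySem.List.pyRange 0 (PySem.List.len xs) 1).map (pvG xs w) := by
  intro n
  induction n using Nat.strong_induction_on with
  | _ n ih =>
    intro xs hn
    simp only [PySem.List.len_eq]
    rcases Nat.eq_zero_or_pos n with h0 | hpos
    · have hxs : xs = [] := List.length_eq_zero_iff.mp (by omega)
      subst hxs
      simp [PySem.List.pyRange_of_pos 0 0 hw]
    · have hne : xs ≠ [] := by
        intro h; subst h; simp at hn; omega
      have hlen : (0 : Int) < (xs.length : Int) := by omega
      rw [pvRange_cons (xs.length : Int) w hw hlen, List.flatMap_cons,
          pvRange_shift (xs.length : Int) w hw]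
      have hflat : ((PySem.List.pyRange 0 ((xs.length : Int) - w) w).map (· + w)).flatMap (pvBlock xs w)
          = (PySem.List.pyRange 0 ((xs.length : Int) - w) w).flatMap (fun i => pvBlock xs w (i + w)) := by
        rw [List.flatMap_def, List.map_map, ← List.flatMap_def]
        rfl
      rw [hflat]
      set t := xs.drop w.toNat with ht
      have hrange : PySem.List.pyRange 0 ((xs.length : Int) - w) w
          = PySem.List.pyRange 0 ((t.length : Nat) : Int) w := by
        have hd : (t.length : Int) = max ((xs.length : Int) - w) 0 := by
          rw [ht, List.length_drop]; omega
        by_cases hle : (xs.length : Int) ≤ w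
        · rw [PySem.List.pyRange_of_pos _ _ hw, PySem.List.pyRange_of_pos _ _ hw,
              if_neg (by omega), if_neg (by omega)]
        · congr 1; omega
      have hcongr : (PySem.List.pyRange 0 ((t.length : Nat) : Int) w).flatMap (fun i => pvBlock xs w (i + w))
          = (PySem.List.pyRange 0 ((t.length : Nat) : Int) w).flatMap (pvBlock t w) := by
        refine List.flatMap_congr ?_
        intro i hi
        have hmem := (PySem.List.mem_pyRange_iff_of_pos hw i).mp hi
        exact pvBlock_shift xs w i hw hmem.1
      have hih := ih t.length (by rw [ht, List.length_drop]; omega) t rfl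
      simp only [PySem.List.len_eq] at hih
      rw [hrange, hcongr, hih]
      -- assemble the RHS
      rw [PySem.List.pyRange_one_append 0 (min w (xs.length : Int)) (xs.length : Int)
            (by omega) (by omega), List.map_append,
          ← pvBlock_zero xs w hw hne, ← pvMap_shift xs w hw]

-- ===== VERDICT (by name: the statement is the Claim_ definition above) =====
theorem dpcm_transform_spec : Claim_equal_dpcm_transform := by
  intro y_vals width _ hpre
  unfold Pre_dpcm_transform at hpre
  unfold Spec_dpcm_transform
  rw [pvA_eq_flat, pvB_eq,
      pvMain width (by omega) y_vals.length y_vals rfl]
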